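-- pv_equiv track=rewrite | github.com/Slash0BZ/speaker-identification | code/extraction/run_coref_gutenberg.py | get_sentence_surface_from_char_span
-- ===== SOURCE A (Python) =====
-- def format_line_to_model(line):
--     return line.replace("``", '"').replace("''", '"').replace("_", "")
--
-- def get_sentence_surface_from_char_span(chapter, char_start, char_end):
--     line_accumulation = 0
--     for i, sent in enumerate(chapter):
--         start = line_accumulation
--         end = start + len(format_line_to_model(sent).replace(" ", ""))
--         line_accumulation = end
--         if char_start >= start and char_end < end:
--             return sent
--     return None
-- ===== SOURCE B (Python) =====
-- def _cleaned_len(sent):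
--     return len(sent.replace("``", '"').replace("''", '"').replace("_", "").replace(" ", ""))
--
-- def get_sentence_surface_from_char_span(chapter, char_start, char_end):
--     # prefix table of cumulative cleaned lengths, then binary search for the
--     # first sentence whose cumulative end exceeds char_end
--     ends = []
--     acc = 0
--     for sent in chapter:
--         acc += _cleaned_len(sent)
--         ends.append(acc)
--     lo, hi = 0, len(ends)
--     while lo < hi:
--         mid = (lo + hi) // 2
--         if ends[mid] <= char_end:
--             lo = mid + 1
--         else:
--             hi = mid
--     if lo == len(ends):
--         return None
--     start = ends[lo - 1] if lo > 0 else 0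
--     if char_start >= start:
--         return chapter[lo]
--     return None
-- ===== Notes on version B (the rewrite author's own statement) =====
-- stated objective: alternative
-- what changed: B precomputes a prefix array of cumulative cleaned lengths and binary-searches it for the first sentence end exceeding char_end, then verifies char_start against that sentence's start, replacing A's linear scan with early return.
import Mathlib
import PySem

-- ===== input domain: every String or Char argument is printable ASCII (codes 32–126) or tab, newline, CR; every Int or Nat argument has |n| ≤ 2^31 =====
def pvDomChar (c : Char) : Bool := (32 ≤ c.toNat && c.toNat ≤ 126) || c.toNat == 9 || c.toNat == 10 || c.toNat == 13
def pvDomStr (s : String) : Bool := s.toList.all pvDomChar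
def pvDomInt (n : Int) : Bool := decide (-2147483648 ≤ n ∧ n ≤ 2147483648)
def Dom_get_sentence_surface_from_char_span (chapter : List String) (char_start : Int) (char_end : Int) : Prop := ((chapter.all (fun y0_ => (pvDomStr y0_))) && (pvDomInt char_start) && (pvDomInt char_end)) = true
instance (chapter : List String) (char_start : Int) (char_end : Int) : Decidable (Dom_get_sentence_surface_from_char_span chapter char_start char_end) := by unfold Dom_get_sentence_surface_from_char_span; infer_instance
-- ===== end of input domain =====

-- B replaces A's linear scan-with-early-return by a prefix table of cumulative
-- cleaned lengths plus a hand-written binary search (objective: alternative).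

-- ===== PORT A =====
def format_line_to_model (line : String) : String :=
  PySem.Str.replace (PySem.Str.replace (PySem.Str.replace line "``" "\"") "''" "\"") "_" ""

def loopA (char_start char_end : Int) : Int → List String → Option String
  | _, [] => none
  | acc, sent :: rest =>
    let start := acc
    let e := start + PySem.Str.len (PySem.Str.replace (format_line_to_model sent) " " "")
    if char_start ≥ start ∧ char_end < e then some sent
    else loopA char_start char_end e rest

def get_sentence_surface_from_char_span (chapter : List String) (char_start : Int) (char_end : Int) : Option String :=
  loopA char_start char_end 0 chapter

-- ===== PORT B =====
def cleanedLen (sent : String) : Int :=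
  PySem.Str.len (PySem.Str.replace (PySem.Str.replace (PySem.Str.replace (PySem.Str.replace sent "``" "\"") "''" "\"") "_" "") " " "")

-- the loop 'for sent in chapter: acc += …; ends.append(acc)' as structural recursion
def buildEnds (acc : Int) : List String → List Int
  | [] => []
  | s :: r => (acc + cleanedLen s) :: buildEnds (acc + cleanedLen s) r

-- the 'while lo < hi' binary-search loop of Source B
def bsearch (ends : List Int) (char_end : Int) (lo hi : Nat) : Nat :=
  if h : lo < hi then
    let mid := (lo + hi) / 2
    if ends.getD mid 0 ≤ char_end then bsearch ends char_end (mid + 1) hi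
    else bsearch ends char_end lo mid
  else lo
termination_by hi - lo
decreasing_by all_goals omega

def get_sentence_surface_from_char_span_alt (chapter : List String) (char_start : Int) (char_end : Int) : Option String :=
  let ends := buildEnds 0 chapter
  let lo := bsearch ends char_end 0 ends.length
  if lo = ends.length then none
  else
    let start := if 0 < lo then ends.getD (lo - 1) 0 else 0
    if char_start ≥ start then some (chapter.getD lo "") else none

-- ===== PRECONDITION & SPEC =====
def Spec_get_sentence_surface_from_char_span (chapter : List String) (char_start : Int) (char_end : Int) (out : Option String) : Prop := out = get_sentence_surface_from_char_span_alt chapter char_start char_end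
instance (chapter : List String) (char_start : Int) (char_end : Int) (out : Option String) : Decidable (Spec_get_sentence_surface_from_char_span chapter char_start char_end out) := by unfold Spec_get_sentence_surface_from_char_span; infer_instance

-- ===== CLAIM (what is proved, stated in full; the proofs are below) =====
def Claim_equal_get_sentence_surface_from_char_span : Prop := ∀ (chapter : List String) (char_start : Int) (char_end : Int), Dom_get_sentence_surface_from_char_span chapter char_start char_end → Spec_get_sentence_surface_from_char_span chapter char_start char_end (get_sentence_surface_from_char_span chapter char_start char_end)

-- ===== LEMMAS AND PROOFS =====

theorem cleanedLen_nonneg (s : String) : 0 ≤ cleanedLen s := by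
  simp [cleanedLen, PySem.Str.len_eq]

theorem length_buildEnds (l : List String) : ∀ acc, (buildEnds acc l).length = l.length := by
  induction l with
  | nil => intro acc; rfl
  | cons s r ih => intro acc; simp [buildEnds, ih]

theorem le_buildEnds (l : List String) : ∀ (acc : Int) (j : Nat), j < l.length →
    acc ≤ (buildEnds acc l).getD j 0 := by
  induction l with
  | nil => intro acc j h; simp at h
  | cons s r ih =>
    intro acc j h
    cases j with
    | zero =>
      have := cleanedLen_nonneg s
      simp only [buildEnds, List.getD_cons_zero]
      omega
    | succ k =>
      have := ih (acc + cleanedLen s) k (by simpa using Nat.lt_of_succ_lt_succ h)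
      calc acc ≤ acc + cleanedLen s := le_add_of_nonneg_right (cleanedLen_nonneg s)
        _ ≤ _ := by simpa [buildEnds] using this

theorem buildEnds_mono (l : List String) : ∀ (acc : Int) (i j : Nat), i ≤ j → j < l.length →
    (buildEnds acc l).getD i 0 ≤ (buildEnds acc l).getD j 0 := by
  induction l with
  | nil => intro acc i j _ h; simp at h
  | cons s r ih =>
    intro acc i j hij hj
    cases i with
    | zero =>
      cases j with
      | zero => exact le_refl _
      | succ k =>
        have := le_buildEnds r (acc + cleanedLen s) k (by simpa using Nat.lt_of_succ_lt_succ hj)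
        simpa [buildEnds] using this
    | succ i' =>
      cases j with
      | zero => omega
      | succ k =>
        have := ih (acc + cleanedLen s) i' k (Nat.le_of_succ_le_succ hij)
          (Nat.lt_of_succ_lt_succ hj)
        simpa [buildEnds] using this

theorem bsearch_spec (ends : List Int) (ce : Int)
    (mono : ∀ i j : Nat, i ≤ j → j < ends.length → ends.getD i 0 ≤ ends.getD j 0) :
    ∀ (fuel lo hi : Nat), hi - lo ≤ fuel → lo ≤ hi → hi ≤ ends.length →
    (∀ j, j < lo → ends.getD j 0 ≤ ce) →
    (∀ j, hi ≤ j → j < ends.length → ce < ends.getD j 0) →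
    (∀ j, j < bsearch ends ce lo hi → ends.getD j 0 ≤ ce) ∧
      bsearch ends ce lo hi ≤ ends.length ∧
      (bsearch ends ce lo hi < ends.length → ce < ends.getD (bsearch ends ce lo hi) 0) := by
  intro fuel
  induction fuel with
  | zero =>
    intro lo hi hfuel hlohi hlen hlow hhigh
    have : lo = hi := by omega
    subst this
    rw [bsearch]
    simp only [lt_irrefl, dite_false]
    exact ⟨hlow, by omega, fun h => hhigh lo (le_refl _) h⟩
  | succ n ih =>
    intro lo hi hfuel hlohi hlen hlow hhigh
    rw [bsearch]
    by_cases h : lo < hi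
    · simp only [h, dite_true]
      by_cases ht : ends.getD ((lo + hi) / 2) 0 ≤ ce
      · simp only [ht, if_true]
        exact ih ((lo + hi) / 2 + 1) hi (by omega) (by omega) hlen
          (fun j hj => by
            by_cases hjlo : j < lo
            · exact hlow j hjlo
            · exact le_trans (mono j ((lo + hi) / 2) (by omega) (by omega)) ht)
          hhigh
      · simp only [ht, if_false]
        exact ih lo ((lo + hi) / 2) (by omega) (by omega) (by omega) hlow
          (fun j hj hjlen => lt_of_lt_of_le (lt_of_not_ge ht) (mono ((lo + hi) / 2) j hj hjlen))
    · simp only [h, dite_false]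
      have : lo = hi := by omega
      subst this
      exact ⟨hlow, by omega, fun hh => hhigh lo (le_refl _) hh⟩

theorem loopA_none (cs ce : Int) (l : List String) : ∀ acc, cs < acc →
    loopA cs ce acc l = none := by
  induction l with
  | nil => intro acc _; rfl
  | cons s r ih =>
    intro acc hacc
    have hnn := cleanedLen_nonneg s
    have hcl : PySem.Str.len (PySem.Str.replace (format_line_to_model s) " " "") = cleanedLen s := rfl
    rw [loopA]
    simp only [hcl]
    rw [if_neg (by intro hc; exact absurd hc.1 (not_le.mpr hacc))]
    exact ih (acc + cleanedLen s) (by omega)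

theorem loopA_eq (cs ce : Int) (l : List String) : ∀ (acc : Int) (r : Nat),
    r ≤ l.length →
    (∀ j, j < r → (buildEnds acc l).getD j 0 ≤ ce) →
    (r < l.length → ce < (buildEnds acc l).getD r 0) →
    loopA cs ce acc l =
      if r < l.length then
        (if cs ≥ (if 0 < r then (buildEnds acc l).getD (r - 1) 0 else acc)
         then some (l.getD r "") else none)
      else none := by
  induction l with
  | nil =>
    intro acc r hr _ _
    simp at hr
    subst hr
    rfl
  | cons s rest ih =>
    intro acc r hr hlow hhit
    have hcl : PySem.Str.len (PySem.Str.replace (format_line_to_model s) " " "") = cleanedLen s := rfl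
    rw [loopA]
    simp only [hcl]
    cases r with
    | zero =>
      have hce : ce < acc + cleanedLen s := by
        simpa [buildEnds] using hhit (by simp)
      by_cases hcs : cs ≥ acc
      · rw [if_pos ⟨hcs, hce⟩]
        simp [hcs]
      · rw [if_neg (by intro hc; exact hcs hc.1)]
        rw [loopA_none cs ce rest (acc + cleanedLen s)
          (by have := cleanedLen_nonneg s; omega)]
        simp [hcs]
    | succ k =>
      have h0 : acc + cleanedLen s ≤ ce := by
        simpa [buildEnds] using hlow 0 (Nat.succ_pos k)
      rw [if_neg (by intro hc; exact absurd hc.2 (not_lt.mpr h0))]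
      rw [ih (acc + cleanedLen s) k (by simpa using Nat.le_of_succ_le_succ hr)
        (fun j hj => by simpa [buildEnds] using hlow (j + 1) (Nat.succ_lt_succ hj))
        (fun hk => by simpa [buildEnds] using hhit (by simpa using Nat.succ_lt_succ hk))]
      cases k with
      | zero => simp [buildEnds]
      | succ m => simp [buildEnds]

-- zeta-reduction of B's let-bindings, for rewriting
theorem alt_unfold (chapter : List String) (cs ce : Int) :
    get_sentence_surface_from_char_span_alt chapter cs ce =
      (if bsearch (buildEnds 0 chapter) ce 0 (buildEnds 0 chapter).length = (buildEnds 0 chapter).length then none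
       else if cs ≥ (if 0 < bsearch (buildEnds 0 chapter) ce 0 (buildEnds 0 chapter).length
                     then (buildEnds 0 chapter).getD (bsearch (buildEnds 0 chapter) ce 0 (buildEnds 0 chapter).length - 1) 0
                     else 0)
            then some (chapter.getD (bsearch (buildEnds 0 chapter) ce 0 (buildEnds 0 chapter).length) "")
            else none) := rfl

-- ===== VERDICT (by name: the statement is the Claim_ definition above) =====
theorem get_sentence_surface_from_char_span_spec : Claim_equal_get_sentence_surface_from_char_span := by
  unfold Claim_equal_get_sentence_surface_from_char_span
  intro chapter cs ce _
  unfold Spec_get_sentence_surface_from_char_span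
  unfold get_sentence_surface_from_char_span
  have hlen : (buildEnds 0 chapter).length = chapter.length := length_buildEnds chapter 0
  have mono : ∀ i j : Nat, i ≤ j → j < (buildEnds 0 chapter).length →
      (buildEnds 0 chapter).getD i 0 ≤ (buildEnds 0 chapter).getD j 0 := by
    intro i j hij hj
    exact buildEnds_mono chapter 0 i j hij (hlen ▸ hj)
  obtain ⟨h1, h2, h3⟩ := bsearch_spec (buildEnds 0 chapter) ce mono
    (buildEnds 0 chapter).length 0 (buildEnds 0 chapter).length
    (by omega) (Nat.zero_le _) (le_refl _) (by omega) (by omega)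
  rw [alt_unfold]
  rw [loopA_eq cs ce chapter 0 (bsearch (buildEnds 0 chapter) ce 0 (buildEnds 0 chapter).length)
    (by omega) h1 (fun hh => h3 (by omega))]
  by_cases hcase : bsearch (buildEnds 0 chapter) ce 0 (buildEnds 0 chapter).length < chapter.length
  · rw [if_pos hcase, if_neg (show ¬ bsearch (buildEnds 0 chapter) ce 0 (buildEnds 0 chapter).length = (buildEnds 0 chapter).length by omega)]
  · rw [if_neg hcase, if_pos (show bsearch (buildEnds 0 chapter) ce 0 (buildEnds 0 chapter).length = (buildEnds 0 chapter).length by omega)]
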